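-- pv_equiv track=rewrite | github.com/pedropreto/codeadvent2021 | day14.py | get_init_dict
-- ===== SOURCE A (Python) =====
-- def get_init_dict(template):
--     """
--     convert string to dict of pairs
--     :param template: initial string
--     :return: dict with counts of pairs
--     """
--     pair_dict = {}
--     for i in range(0, len(template)):
--         pair = template[i:i + 2]
--         if pair in pair_dict.keys():
--             pair_dict[pair] += 1
--         else:
--             if len(pair) == 2:
--                 pair_dict[pair] = 1
--     return pair_dict
-- ===== SOURCE B (Python) =====
-- def get_init_dict(template):
--     """
--     convert string to dict of pairs
--     :param template: initial string
--     :return: dict with counts of pairs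
--     """
--     pairs = [template[i:i + 2] for i in range(len(template) - 1)]
--     return {p: pairs.count(p) for p in dict.fromkeys(pairs)}
-- ===== Notes on version B (the rewrite author's own statement) =====
-- stated objective: alternative
-- what changed: Replaces the incremental membership-test/update dict loop with a two-phase strategy: materialise the list of adjacent two-char pairs, deduplicate it in first-occurrence order with dict.fromkeys, and build the result in one comprehension counting each distinct pair in the list.
import Mathlib
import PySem

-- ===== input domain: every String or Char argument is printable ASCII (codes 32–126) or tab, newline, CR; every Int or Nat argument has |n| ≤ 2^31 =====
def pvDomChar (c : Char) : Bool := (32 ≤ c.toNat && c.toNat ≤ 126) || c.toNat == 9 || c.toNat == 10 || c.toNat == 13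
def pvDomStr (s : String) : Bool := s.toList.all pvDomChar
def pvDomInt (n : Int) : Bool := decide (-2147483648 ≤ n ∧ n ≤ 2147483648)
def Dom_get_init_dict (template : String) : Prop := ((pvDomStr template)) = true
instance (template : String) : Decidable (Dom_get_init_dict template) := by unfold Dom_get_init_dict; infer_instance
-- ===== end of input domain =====

-- B replaces A's incremental membership-test/update dict loop by materialising the
-- list of adjacent two-char pairs, deduplicating it in first-occurrence order, and
-- counting each distinct pair in that list (alternative decomposition, same cost class).


-- ===== PORT A =====
def get_init_dict (template : String) : List (String × Int) :=
  ((PySem.List.pyRange 0 (PySem.Str.len template)).foldl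
    (fun pair_dict i =>
      let pair := PySem.Str.slice template (some i) (some (i + 2))
      if pair_dict.contains pair then
        pair_dict.insert pair (pair_dict.getD pair 0 + 1)
      else if PySem.Str.len pair == 2 then
        pair_dict.insert pair 1
      else
        pair_dict)
    PySem.Dict.empty).items

-- ===== PORT B =====
def get_init_dict_alt (template : String) : List (String × Int) :=
  let pairs := (PySem.List.pyRange 0 (PySem.Str.len template - 1)).map
    (fun i => PySem.Str.slice template (some i) (some (i + 2)))
  (PySem.List.dedup pairs).map (fun p => (p, (PySem.List.count pairs p : Int)))

-- ===== PRECONDITION & SPEC =====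
def Spec_get_init_dict (template : String) (out : List (String × Int)) : Prop := out = get_init_dict_alt template
instance (template : String) (out : List (String × Int)) : Decidable (Spec_get_init_dict template out) := by unfold Spec_get_init_dict; infer_instance

-- ===== CLAIM (what is proved, stated in full; the proofs are below) =====
def Claim_equal_get_init_dict : Prop := ∀ (template : String), Dom_get_init_dict template → Spec_get_init_dict template (get_init_dict template)

-- ===== LEMMAS AND PROOFS =====

-- every slice template[i:i+2] taken at 0 ≤ i < len-1 has exactly two characters
lemma pair_len_two (t : String) (i : Int) (h0 : 0 ≤ i)
    (h1 : i < (t.toList.length : Int) - 1) :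
    (PySem.Str.slice t (some i) (some (i + 2))).toList.length = 2 := by
  obtain ⟨k, rfl⟩ := Int.eq_ofNat_of_zero_le h0
  have e : ((k : Int) + 2) = ((k + 2 : Nat) : Int) := by push_cast; ring
  rw [PySem.Str.toList_slice, PySem.Chars.slice_eq_listSlice, e,
    PySem.List.slice_natCast]
  simp only [List.length_take, List.length_drop]
  omega

-- the trailing slice template[len-1:len+1] has exactly one character
lemma last_len_one (t : String) (h1 : 0 < t.toList.length) :
    (PySem.Str.slice t (some ((t.toList.length : Int) - 1))
      (some ((t.toList.length : Int) - 1 + 2))).toList.length = 1 := by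
  have e2 : ((t.toList.length : Int) - 1 + 2) = ((t.toList.length + 1 : Nat) : Int) := by omega
  have e1 : ((t.toList.length : Int) - 1) = ((t.toList.length - 1 : Nat) : Int) := by omega
  rw [PySem.Str.toList_slice, PySem.Chars.slice_eq_listSlice, e2, e1,
    PySem.List.slice_natCast]
  simp only [List.length_take, List.length_drop]
  omega

-- A's loop body on a two-character pair is exactly the Counter update step
lemma step_eq_counter_step (d : PySem.Dict String Int) (p : String)
    (hp : p.toList.length = 2) :
    (if d.contains p then d.insert p (d.getD p 0 + 1)
     else if PySem.Str.len p == 2 then d.insert p 1 else d)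
    = d.insert p (d.getD p 0 + 1) := by
  by_cases hc : d.contains p
  · rw [if_pos hc]
  · have h2 : (PySem.Str.len p == 2) = true := by
      rw [PySem.Str.len_eq, hp]; decide
    rw [if_neg hc, if_pos h2,
      PySem.Dict.getD_of_not_contains _ _ (by simpa using hc)]
    norm_num

-- ===== VERDICT (by name: the statement is the Claim_ definition above) =====
theorem get_init_dict_spec : Claim_equal_get_init_dict := by
  intro t _
  unfold Spec_get_init_dict get_init_dict get_init_dict_alt
  rw [PySem.Str.len_eq]
  rcases Nat.eq_zero_or_pos t.toList.length with h0 | hpos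
  · -- empty string: both loops run over the empty range
    rw [h0,
      PySem.List.pyRange_one_eq_nil (by norm_num),
      PySem.List.pyRange_one_eq_nil (by norm_num)]
    rfl
  · -- len ≥ 1: A's loop is the len-1 counter steps plus one final no-op step
    have hsplit := PySem.List.pyRange_one_succ_right
      (a := 0) (b := (t.toList.length : Int) - 1) (by omega)
    rw [sub_add_cancel] at hsplit
    rw [hsplit, List.foldl_append]
    simp only [List.foldl_cons, List.foldl_nil]
    -- the first len-1 steps build the counter of the pair list
    rw [PySem.List.foldl_congr_mem _ _
      (fun d i => d.insert (PySem.Str.slice t (some i) (some (i + 2)))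
        (d.getD (PySem.Str.slice t (some i) (some (i + 2))) 0 + 1)) _
      (by
        intro d i hi
        rw [PySem.List.mem_pyRange_one] at hi
        exact step_eq_counter_step d _ (pair_len_two t i hi.1 hi.2))]
    have hmap : List.foldl
        (fun d i => d.insert (PySem.Str.slice t (some i) (some (i + 2)))
          (d.getD (PySem.Str.slice t (some i) (some (i + 2))) 0 + 1))
        PySem.Dict.empty (PySem.List.pyRange 0 ((t.toList.length : Int) - 1))
        = PySem.Dict.counter
          ((PySem.List.pyRange 0 ((t.toList.length : Int) - 1)).map
            (fun i => PySem.Str.slice t (some i) (some (i + 2)))) := by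
      rw [← PySem.Dict.foldl_insert_getD_add_one_eq_counter, List.foldl_map]
    rw [hmap]
    -- the final step: a one-character pair is never a key and fails the len==2 test
    have hlast1 := last_len_one t hpos
    have hnotmem : PySem.Str.slice t (some ((t.toList.length : Int) - 1))
        (some ((t.toList.length : Int) - 1 + 2))
        ∉ (PySem.List.pyRange 0 ((t.toList.length : Int) - 1)).map
          (fun i => PySem.Str.slice t (some i) (some (i + 2))) := by
      intro hmem
      rw [List.mem_map] at hmem
      obtain ⟨j, hj, he⟩ := hmem
      rw [PySem.List.mem_pyRange_one] at hj
      have h2 := pair_len_two t j hj.1 hj.2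
      rw [he, hlast1] at h2
      omega
    have hnc : (PySem.Dict.counter
        ((PySem.List.pyRange 0 ((t.toList.length : Int) - 1)).map
          (fun i => PySem.Str.slice t (some i) (some (i + 2))))).contains
        (PySem.Str.slice t (some ((t.toList.length : Int) - 1))
          (some ((t.toList.length : Int) - 1 + 2))) = false := by
      rw [PySem.Dict.contains_counter]
      simpa using hnotmem
    have hne2 : (PySem.Str.len (PySem.Str.slice t (some ((t.toList.length : Int) - 1))
        (some ((t.toList.length : Int) - 1 + 2))) == 2) = false := by
      rw [PySem.Str.len_eq, hlast1]; decide
    simp only [hnc, hne2, Bool.false_eq_true, if_false]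
    -- B's comprehension is the items of the same counter
    rw [PySem.Dict.items_counter, PySem.List.dedup_eq_ofList]
    simp only [PySem.List.count_eq]
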